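-- pv_equiv track=rewrite | github.com/GuutLemon/CyberSecStudy | Python/Advent_of_codes/2015/day9.py | distance_cal
-- ===== SOURCE A (Python) =====
-- def distance_cal(paths, distances):
--     min_total_distance = 99999999999999999999
--     max_total_distance = 0
--     for i in paths:
--         total_distance = 0
--         for j in range(len(i)):
--             if j < len(i) - 1:
--                 if (i[j], i[j+1]) in distances:
--                     total_distance += distances[(i[j], i[j+1])]
--                 else:
--                     total_distance = 0
--                     break
--         # Part 1
--         if total_distance < min_total_distance and total_distance != 0:
--             min_total_distance = total_distance
--         # Part 2
--         if total_distance > max_total_distance: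
--             max_total_distance = total_distance
--
--     return min_total_distance, max_total_distance
-- ===== SOURCE B (Python) =====
-- def path_distance(p, distances, total=0):
--     # walk consecutive pairs; a missing edge zeroes the whole path
--     if len(p) < 2:
--         return total
--     if (p[0], p[1]) not in distances:
--         return 0
--     return path_distance(p[1:], distances, total + distances[(p[0], p[1])])
--
--
-- def distance_cal(paths, distances):
--     totals = [path_distance(p, distances) for p in paths]
--     big = 99999999999999999999
--     nonzero = [t for t in totals if t != 0]
--     return (min([big] + nonzero), max([0] + totals))
-- ===== Notes on version B (the rewrite author's own statement) =====
-- stated objective: simpler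
-- what changed: Replaces A's fused index loop with break and in-place min/max bookkeeping by a recursive per-path distance helper, a precomputed totals list, and two builtin reductions (min over nonzero totals with the huge default, max floored at 0).
import Mathlib
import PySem

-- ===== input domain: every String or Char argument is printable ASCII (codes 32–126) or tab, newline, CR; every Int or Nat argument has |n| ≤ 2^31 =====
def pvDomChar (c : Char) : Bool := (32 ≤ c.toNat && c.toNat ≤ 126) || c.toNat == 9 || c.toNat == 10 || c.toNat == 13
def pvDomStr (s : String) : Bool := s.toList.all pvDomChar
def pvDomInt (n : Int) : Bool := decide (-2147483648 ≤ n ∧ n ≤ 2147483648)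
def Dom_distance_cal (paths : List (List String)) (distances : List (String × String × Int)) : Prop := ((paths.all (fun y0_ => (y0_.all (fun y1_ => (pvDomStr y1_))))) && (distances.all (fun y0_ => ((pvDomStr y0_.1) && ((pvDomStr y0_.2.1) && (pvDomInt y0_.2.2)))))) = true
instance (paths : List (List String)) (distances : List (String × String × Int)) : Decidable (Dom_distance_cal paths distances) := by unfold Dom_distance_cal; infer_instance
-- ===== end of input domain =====

-- B replaces A's fused index loop with break and in-place min/max bookkeeping by a
-- recursive per-path distance helper, a precomputed totals list and two builtin
-- reductions (objective: simpler).


-- ===== PORT A =====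
-- dict lookup: first entry whose key pair matches (Python dicts have unique keys;
-- on the association-list input this is first-match, the convention's dict semantics)
def pvLookup (distances : List (String × String × Int)) (a b : String) : Option Int :=
  match distances with
  | [] => none
  | (x, y, d) :: rest => if x = a ∧ y = b then some d else pvLookup rest a b

-- inner loop of A: 'for j in range(len(i))' with the break-to-0; js is the remaining range
def pvInnerA (distances : List (String × String × Int)) (i : List String)
    (js : List Nat) (total : Int) : Int :=
  match js with
  | [] => total
  | j :: js' =>
    if j < i.length - 1 then
      -- both indices are in range here (j+1 ≤ len-1), so getD is exact for i[j], i[j+1]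
      match pvLookup distances (i.getD j "") (i.getD (j + 1) "") with
      | some d => pvInnerA distances i js' (total + d)
      | none => 0
    else pvInnerA distances i js' total

def distance_cal (paths : List (List String)) (distances : List (String × String × Int)) : Int × Int :=
  paths.foldl
    (fun st i =>
      let total := pvInnerA distances i (List.range i.length) 0
      let mn := if total < st.1 ∧ total ≠ 0 then total else st.1
      let mx := if total > st.2 then total else st.2
      (mn, mx))
    (99999999999999999999, 0)

-- ===== PORT B =====
-- B's recursive helper: walk consecutive pairs, a missing edge zeroes the path
def pvPathDist (distances : List (String × String × Int)) (total : Int) : List String → Int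
  | a :: b :: rest =>
    match pvLookup distances a b with
    | some d => pvPathDist distances (total + d) (b :: rest)
    | none => 0
  | _ => total

def distance_cal_alt (paths : List (List String)) (distances : List (String × String × Int)) : Int × Int :=
  let totals := paths.map (pvPathDist distances 0)
  let nonzero := totals.filter (fun t => t ≠ 0)
  (nonzero.foldl min 99999999999999999999, totals.foldl max 0)

-- ===== PRECONDITION & SPEC =====
def Spec_distance_cal (paths : List (List String)) (distances : List (String × String × Int)) (out : Int × Int) : Prop := out = distance_cal_alt paths distances
instance (paths : List (List String)) (distances : List (String × String × Int)) (out : Int × Int) : Decidable (Spec_distance_cal paths distances out) := by unfold Spec_distance_cal; infer_instance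

-- ===== CLAIM (what is proved, stated in full; the proofs are below) =====
def Claim_equal_distance_cal : Prop := ∀ (paths : List (List String)) (distances : List (String × String × Int)), Dom_distance_cal paths distances → Spec_distance_cal paths distances (distance_cal paths distances)

-- ===== LEMMAS AND PROOFS =====

-- A's inner range loop from index j equals B's pair walk over the suffix i.drop j
theorem pvInner_eq_pathDist (distances : List (String × String × Int)) (i : List String) :
    ∀ n j total, j + n = i.length →
      pvInnerA distances i (List.range' j n) total = pvPathDist distances total (i.drop j) := by
  intro n
  induction n with
  | zero =>
    intro j total h
    simp [pvInnerA]
    rw [List.drop_of_length_le (by omega)]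
    rfl
  | succ n ih =>
    intro j total h
    rw [List.range'_succ]
    by_cases hn : n = 0
    · subst hn
      have hj : ¬ j < i.length - 1 := by omega
      simp [pvInnerA, hj]
      have hjl : j < i.length := by omega
      rw [List.drop_eq_getElem_cons hjl, List.drop_of_length_le (by omega)]
      rfl
    · have hj : j < i.length - 1 := by omega
      have hjl : j < i.length := by omega
      have hj1 : j + 1 < i.length := by omega
      simp only [pvInnerA, if_pos hj]
      rw [List.drop_eq_getElem_cons hjl, List.drop_eq_getElem_cons hj1]
      rw [List.getD_eq_getElem i "" hjl, List.getD_eq_getElem i "" hj1]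
      simp only [pvPathDist]
      cases pvLookup distances i[j] i[j + 1] with
      | none => rfl
      | some d =>
        simp only []
        rw [ih (j + 1) (total + d) (by omega), List.drop_eq_getElem_cons hj1]

-- A's fused fold equals the pair of separate reductions over the totals list
theorem pv_outer (distances : List (String × String × Int)) :
    ∀ (paths : List (List String)) (mn mx : Int),
      paths.foldl
        (fun st i =>
          let total := pvInnerA distances i (List.range i.length) 0
          let mn' := if total < st.1 ∧ total ≠ 0 then total else st.1
          let mx' := if total > st.2 then total else st.2
          (mn', mx'))
        (mn, mx)
      = (((paths.map (pvPathDist distances 0)).filter (fun t => t ≠ 0)).foldl min mn,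
         (paths.map (pvPathDist distances 0)).foldl max mx) := by
  intro paths
  induction paths with
  | nil => intro mn mx; rfl
  | cons p ps ih =>
    intro mn mx
    have ht : pvInnerA distances p (List.range p.length) 0 = pvPathDist distances 0 p := by
      rw [List.range_eq_range']
      exact pvInner_eq_pathDist distances p p.length 0 0 (by omega)
    simp only [List.foldl_cons, List.map_cons, ht]
    set t := pvPathDist distances 0 p with hdef
    rw [ih]
    congr 1
    · by_cases h0 : t = 0
      · simp [h0, List.filter]
      · have hm : (if t < mn then t else mn) = min mn t := by
          by_cases hlt : t < mn <;> simp [hlt] <;> omega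
        simp [List.filter, h0, hm]
    · have : (if t > mx then t else mx) = max mx t := by
        by_cases hlt : t > mx <;> simp [hlt] <;> omega
      rw [this]

-- ===== VERDICT (by name: the statement is the Claim_ definition above) =====
theorem distance_cal_spec : Claim_equal_distance_cal := by
  intro paths distances _
  unfold Spec_distance_cal distance_cal distance_cal_alt
  exact pv_outer distances paths _ _
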